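-- pv_equiv track=rewrite | github.com/alemariusnexus/pianotrain | src/data/scripts/lib/util.py | countCompositions
-- ===== SOURCE A (Python) =====
-- countCompositionsCache = {}
--
-- def countCompositions(elems, sum):
--     if sum == 0:
--         return 1
--     elif (elems, sum) in countCompositionsCache:
--         return countCompositionsCache[elems, sum]
--
--     numComps = 0
--
--     for e in elems:
--         if e <= sum:
--             numComps = numComps + countCompositions(elems, sum - e)
--
--     countCompositionsCache[elems, sum] = numComps
--
--     return numComps
-- ===== SOURCE B (Python) =====
-- def countCompositions(elems, sum):
--     # Pass 1: the set of positive targets reachable from `sum` by repeatedly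
--     # subtracting a positive element (level-by-level reachability, no recursion).
--     seen = set()
--     frontier = {sum} if sum > 0 else set()
--     while frontier:
--         seen |= frontier
--         nxt = set()
--         for s in frontier:
--             for e in elems:
--                 if 0 < e <= s:
--                     t = s - e
--                     if t > 0 and t not in seen:
--                         nxt.add(t)
--         frontier = nxt
--     # Pass 2: bottom-up DP over the reachable targets in increasing order.
--     dp = {0: 1}
--     for s in sorted(seen):
--         acc = 0
--         for e in elems:
--             if 0 < e <= s:
--                 acc += dp.get(s - e, 0)
--         dp[s] = acc
--     return dp.get(sum, 0)
-- ===== Notes on version B (the rewrite author's own statement) =====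
-- stated objective: alternative
-- what changed: Replaced the top-down memoized recursion with two explicit passes: a level-by-level reachability scan collecting the positive targets the recursion would visit, then a bottom-up dictionary DP over those targets in increasing order (no recursion, no cache).
-- outside the precondition, e.g. on countCompositions((-1, -1, 4, 2), -1): A returns 2, B returns 0; on countCompositions((1,), 9200): A returns 1, B returns 1; on countCompositions((0,), 1): A raises RecursionError, B returns 0
import Mathlib
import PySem

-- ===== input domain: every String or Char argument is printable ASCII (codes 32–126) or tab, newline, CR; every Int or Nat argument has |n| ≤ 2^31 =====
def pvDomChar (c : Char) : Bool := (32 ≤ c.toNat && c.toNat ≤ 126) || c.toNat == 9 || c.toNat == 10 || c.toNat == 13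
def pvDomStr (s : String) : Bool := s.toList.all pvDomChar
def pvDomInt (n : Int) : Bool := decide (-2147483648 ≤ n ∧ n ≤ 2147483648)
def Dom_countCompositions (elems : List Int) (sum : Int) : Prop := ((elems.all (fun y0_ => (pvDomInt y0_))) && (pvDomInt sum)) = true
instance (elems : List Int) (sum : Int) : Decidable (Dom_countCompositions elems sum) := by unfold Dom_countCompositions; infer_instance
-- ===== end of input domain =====

-- B replaces A's top-down memoized recursion with two explicit passes: a level-by-level
-- reachability scan collecting the positive targets the recursion would visit, then a
-- bottom-up dictionary DP over those targets in increasing order (no recursion, no cache).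

-- ===== PORT A =====
-- A's unbounded recursion is made total with a fuel parameter (under Pre_ the fuel
-- sum.toNat + 1 is never exhausted); A's memo cache is threaded through explicitly as a
-- hash map. Within one top-level call `elems` never changes, so Python's cache key
-- (elems, sum) is carried as the key sum alone.
def countCompA : Nat → List Int → Int → Std.HashMap Int Int → Int × Std.HashMap Int Int
  | 0, _, _, cache => (0, cache)
  | fuel + 1, elems, sum, cache =>
    if sum = 0 then (1, cache)
    else
      match cache[sum]? with
      | some v => (v, cache)
      | none =>
        let p := elems.foldl
          (fun p e =>
            if e ≤ sum then
              let r := countCompA fuel elems (sum - e) p.2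
              (p.1 + r.1, r.2)
            else p)
          ((0 : Int), cache)
        (p.1, p.2.insert sum p.1)

def countCompositions (elems : List Int) (sum : Int) : Int :=
  (countCompA (sum.toNat + 1) elems sum ∅).1

-- ===== PORT B =====
-- levelStep is Source B's body of the `while frontier` loop that builds `nxt` (the next
-- frontier) from the current one; the Set consumptions are order-independent (they only
-- build other Sets / feed a keyless sorted), as PySem.Set requires.
def levelStep (elems : List Int) (seen : PySem.Set Int) (frontier : PySem.Set Int) : PySem.Set Int :=
  frontier.foldl
    (fun nxt s =>
      elems.foldl
        (fun nxt e =>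
          if 0 < e ∧ e ≤ s then
            (if 0 < s - e ∧ ¬ (PySem.Set.contains seen (s - e) = true) then PySem.Set.add nxt (s - e)
             else nxt)
          else nxt)
        nxt)
    PySem.Set.empty

-- Source B's `while frontier:` loop, totalised with fuel (sum.toNat + 1 levels always
-- suffice: the largest frontier element drops by at least 1 per level).
def reachLoop (elems : List Int) : Nat → PySem.Set Int → PySem.Set Int → PySem.Set Int
  | 0, seen, _ => seen
  | fuel + 1, seen, frontier =>
    if frontier = ([] : List Int) then seen
    else
      let seen' := PySem.Set.update seen frontier
      reachLoop elems fuel seen' (levelStep elems seen' frontier)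

def countCompositions_alt (elems : List Int) (sum : Int) : Int :=
  let frontier0 : PySem.Set Int :=
    if 0 < sum then PySem.Set.add PySem.Set.empty sum else PySem.Set.empty
  let seen := reachLoop elems (sum.toNat + 1) PySem.Set.empty frontier0
  let dp :=
    (PySem.List.sorted seen (fun x => x) false).foldl
      (fun dp s =>
        PySem.Dict.insert dp s
          (elems.foldl
            (fun acc e => if 0 < e ∧ e ≤ s then acc + PySem.Dict.getD dp (s - e) 0 else acc) 0))
      (PySem.Dict.insert PySem.Dict.empty 0 1)
  PySem.Dict.getD dp sum 0

-- ===== PRECONDITION & SPEC =====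
-- Pre_ excludes (i) inputs with a nonpositive element e ≤ sum, on which A almost always
-- recurses forever (RecursionError) and on exceptional inputs accidentally counts
-- compositions with nonpositive parts, and (ii) inputs where some positive element
-- e ≤ sum has sum > 9000·e, whose first recursion chain (about sum/e nested calls)
-- reaches CPython's recursion limit and raises RecursionError; the 9000 margin is
-- conservative (the exact crash depth depends on stack headroom), so a narrow band of
-- deep inputs on which A still returns is excluded with it.
def Pre_countCompositions (elems : List Int) (sum : Int) : Prop :=
  sum = 0 ∨ ((∀ e ∈ elems, e ≤ 0 → sum < e) ∧ (∀ e ∈ elems, 0 < e → e ≤ sum → sum ≤ 9000 * e))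
instance (elems : List Int) (sum : Int) : Decidable (Pre_countCompositions elems sum) := by
  unfold Pre_countCompositions; infer_instance

def pvWitness_countCompositions : List Int × Int := ([1, 2], 5)

def Spec_countCompositions (elems : List Int) (sum : Int) (out : Int) : Prop := out = countCompositions_alt elems sum
instance (elems : List Int) (sum : Int) (out : Int) : Decidable (Spec_countCompositions elems sum out) := by unfold Spec_countCompositions; infer_instance

-- ===== CLAIM (what is proved, stated in full; the proofs are below) =====
def Claim_equal_countCompositions : Prop := ∀ (elems : List Int) (sum : Int), Dom_countCompositions elems sum → Pre_countCompositions elems sum → Spec_countCompositions elems sum (countCompositions elems sum)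

-- ===== LEMMAS AND PROOFS =====

-- The mathematical count both programs compute: F elems s = number of ordered
-- compositions of s into positive parts drawn from elems (with multiplicity).
def F (elems : List Int) (s : Int) : Int :=
  if h : 0 < s then
    elems.attach.foldl
      (fun acc e => if _he : 0 < e.1 ∧ e.1 ≤ s then acc + F elems (s - e.1) else acc) 0
  else if s = 0 then 1 else 0
termination_by s.toNat
decreasing_by omega

theorem F_zero (elems : List Int) : F elems 0 = 1 := by
  rw [F]; norm_num

theorem F_neg (elems : List Int) (s : Int) (h : s < 0) : F elems s = 0 := by
  rw [F, dif_neg (by omega), if_neg (by omega)]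

theorem F_unfold_pos (elems : List Int) (s : Int) (h : 0 < s) :
    F elems s =
      elems.foldl (fun acc e => if 0 < e ∧ e ≤ s then acc + F elems (s - e) else acc) 0 := by
  rw [F, dif_pos h]
  simp only [dite_eq_ite]
  exact List.foldl_attach
    (f := fun acc e => if 0 < e ∧ e ≤ s then acc + F elems (s - e) else acc) (b := 0)

theorem foldl_id_of (l : List Int) (f : Int → Int → Int) (a : Int)
    (h : ∀ x ∈ l, ∀ acc, f acc x = acc) : l.foldl f a = a := by
  induction l generalizing a with
  | nil => rfl
  | cons x t ih =>
    simp only [List.foldl_cons, h x (by simp)]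
    exact ih a (fun y hy acc => h y (List.mem_cons_of_mem _ hy) acc)

theorem foldl_congr_mem' (l : List Int) (f g : Int → Int → Int) (a : Int)
    (h : ∀ x ∈ l, ∀ acc, f acc x = g acc x) : l.foldl f a = l.foldl g a := by
  induction l generalizing a with
  | nil => rfl
  | cons x t ih =>
    simp only [List.foldl_cons, h x (by simp)]
    exact ih _ (fun y hy acc => h y (List.mem_cons_of_mem _ hy) acc)

-- F satisfies A's loop recurrence whenever no nonpositive element is active.
theorem F_rec (elems : List Int) (sum : Int) (h0 : sum ≠ 0)
    (hall : ∀ e ∈ elems, e ≤ 0 → sum < e) :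
    F elems sum =
      elems.foldl (fun acc e => if e ≤ sum then acc + F elems (sum - e) else acc) 0 := by
  rcases Int.lt_or_lt_of_ne h0 with hneg | hpos
  · rw [F_neg elems sum hneg]
    refine (foldl_id_of _ _ _ ?_).symm
    intro e he acc
    have : ¬ e ≤ sum := by
      intro hle
      have := hall e he (by omega)
      omega
    simp [this]
  · rw [F_unfold_pos elems sum hpos]
    apply foldl_congr_mem'
    intro e he acc
    by_cases hle : e ≤ sum
    · have hepos : 0 < e := by
        by_contra hnp
        have := hall e he (by omega)
        omega
      rw [if_pos ⟨hepos, hle⟩, if_pos hle]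
    · rw [if_neg (by tauto), if_neg hle]

-- every value stored in the memo cache is F at its key
def GoodCache (elems : List Int) (c : Std.HashMap Int Int) : Prop :=
  ∀ (k v : Int), getElem? c k = some v → v = F elems k

theorem memo_main (elems : List Int) : ∀ (f : Nat) (sum : Int) (c : Std.HashMap Int Int),
    Pre_countCompositions elems sum → sum.toNat < f → GoodCache elems c →
    (countCompA f elems sum c).1 = F elems sum ∧
      GoodCache elems (countCompA f elems sum c).2 := by
  intro f
  induction f with
  | zero => intro sum _ _ h; omega
  | succ f ih =>
    intro sum c hpre hf hc
    by_cases h0 : sum = 0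
    · subst h0
      constructor
      · simp [countCompA, F_zero]
      · simpa [countCompA] using hc
    · have hpp := hpre.resolve_left h0
      have hall : ∀ e ∈ elems, e ≤ 0 → sum < e := hpp.1
      have hdep : ∀ e ∈ elems, 0 < e → e ≤ sum → sum ≤ 9000 * e := hpp.2
      simp only [countCompA, if_neg h0]
      cases hget : (getElem? c sum : Option Int) with
      | some v =>
        exact ⟨hc sum v hget, hc⟩
      | none =>
        have inner : ∀ (l : List Int), (∀ e ∈ l, e ∈ elems) → ∀ (a : Int) (c' : Std.HashMap Int Int),
            GoodCache elems c' →
            (l.foldl (fun p e =>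
              if e ≤ sum then
                let r := countCompA f elems (sum - e) p.2
                (p.1 + r.1, r.2)
              else p) (a, c')).1 =
              l.foldl (fun acc e => if e ≤ sum then acc + F elems (sum - e) else acc) a ∧
            GoodCache elems (l.foldl (fun p e =>
              if e ≤ sum then
                let r := countCompA f elems (sum - e) p.2
                (p.1 + r.1, r.2)
              else p) (a, c')).2 := by
          intro l
          induction l with
          | nil => intro _ a c' hc'; exact ⟨rfl, hc'⟩
          | cons e t iht =>
            intro hsub a c' hc'
            by_cases hle : e ≤ sum
            · have hepos : 0 < e := by
                by_contra hnp
                have := hall e (hsub e (by simp)) (by omega)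
                omega
              have hpre' : Pre_countCompositions elems (sum - e) := by
                by_cases hz : sum - e = 0
                · exact Or.inl hz
                · refine Or.inr ⟨fun e' he' hnp => ?_, fun e' he' hp' hle' => ?_⟩
                  · have := hall e' he' hnp
                    omega
                  · have := hdep e' he' hp' (by omega)
                    omega
              have hfuel : (sum - e).toNat < f := by omega
              obtain ⟨hv, hg⟩ := ih (sum - e) c' hpre' hfuel hc'
              simp only [List.foldl_cons, if_pos hle]
              have := iht (fun x hx => hsub x (List.mem_cons_of_mem _ hx))
                (a + (countCompA f elems (sum - e) c').1) (countCompA f elems (sum - e) c').2 hg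
              refine ⟨?_, this.2⟩
              rw [this.1, hv]
            · simp only [List.foldl_cons, if_neg hle]
              exact iht (fun x hx => hsub x (List.mem_cons_of_mem _ hx)) a c' hc'
        obtain ⟨hv, hg⟩ := inner elems (fun _ h => h) 0 c hc
        rw [hv, ← F_rec elems sum h0 hall]
        refine ⟨rfl, ?_⟩
        intro k v hk
        rw [Std.HashMap.getElem?_insert] at hk
        by_cases hks : sum = k
        · subst hks
          simp only [BEq.rfl, reduceIte, Option.some.injEq] at hk
          exact hk.symm
        · have : (sum == k) = false := by simpa using hks
          rw [this] at hk
          simp only [Bool.false_eq_true, reduceIte] at hk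
          exact hg k v hk

-- ===== B-side: the reachability pass =====

theorem mem_innerFold (seen : PySem.Set Int) (s : Int) (elems : List Int)
    (nxt : PySem.Set Int) (t : Int) :
    t ∈ elems.foldl
        (fun nxt e =>
          if 0 < e ∧ e ≤ s then
            (if 0 < s - e ∧ ¬ (PySem.Set.contains seen (s - e) = true) then PySem.Set.add nxt (s - e)
             else nxt)
          else nxt) nxt ↔
      t ∈ nxt ∨ ∃ e ∈ elems, (0 < e ∧ e ≤ s) ∧ t = s - e ∧ 0 < t ∧ t ∉ seen := by
  induction elems generalizing nxt with
  | nil => simp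
  | cons e rest ih =>
    simp only [List.foldl_cons]
    rw [ih]
    by_cases h1 : 0 < e ∧ e ≤ s
    · rw [if_pos h1]
      by_cases h2 : 0 < s - e ∧ ¬ (PySem.Set.contains seen (s - e) = true)
      · rw [if_pos h2]
        rw [PySem.Set.mem_add]
        constructor
        · rintro (⟨hn | he⟩ | hrest)
          · exact Or.inl hn
          · refine Or.inr ⟨e, by simp, h1, he, ?_, ?_⟩
            · omega
            · rw [he]; intro hmem; exact h2.2 ((PySem.Set.contains_iff seen (s - e)).mpr hmem)
          · rcases hrest with ⟨e', he', hg, ht, hp, hns⟩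
            exact Or.inr ⟨e', by simp [he'], hg, ht, hp, hns⟩
        · rintro (hn | ⟨e', he', hg, ht, hp, hns⟩)
          · exact Or.inl (Or.inl hn)
          · rcases List.mem_cons.mp he' with rfl | he'
            · exact Or.inl (Or.inr ht)
            · exact Or.inr ⟨e', he', hg, ht, hp, hns⟩
      · rw [if_neg h2]
        constructor
        · rintro (hn | ⟨e', he', hg, ht, hp, hns⟩)
          · exact Or.inl hn
          · exact Or.inr ⟨e', by simp [he'], hg, ht, hp, hns⟩
        · rintro (hn | ⟨e', he', hg, ht, hp, hns⟩)
          · exact Or.inl hn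
          · rcases List.mem_cons.mp he' with rfl | he'
            · exfalso
              apply h2
              refine ⟨by omega, ?_⟩
              intro hcon
              exact hns (ht ▸ (PySem.Set.contains_iff _ _).mp hcon)
            · exact Or.inr ⟨e', he', hg, ht, hp, hns⟩
    · rw [if_neg h1]
      constructor
      · rintro (hn | ⟨e', he', hg, ht, hp, hns⟩)
        · exact Or.inl hn
        · exact Or.inr ⟨e', by simp [he'], hg, ht, hp, hns⟩
      · rintro (hn | ⟨e', he', hg, ht, hp, hns⟩)
        · exact Or.inl hn
        · rcases List.mem_cons.mp he' with rfl | he'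
          · exact absurd hg h1
          · exact Or.inr ⟨e', he', hg, ht, hp, hns⟩

theorem mem_levelStep (elems : List Int) (seen frontier : PySem.Set Int) (t : Int) :
    t ∈ levelStep elems seen frontier ↔
      ∃ s ∈ frontier, ∃ e ∈ elems, (0 < e ∧ e ≤ s) ∧ t = s - e ∧ 0 < t ∧ t ∉ seen := by
  unfold levelStep
  have gen : ∀ (fr : List Int) (nxt : PySem.Set Int),
      t ∈ fr.foldl
          (fun nxt s =>
            elems.foldl
              (fun nxt e =>
                if 0 < e ∧ e ≤ s then
                  (if 0 < s - e ∧ ¬ (PySem.Set.contains seen (s - e) = true) then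
                    PySem.Set.add nxt (s - e)
                   else nxt)
                else nxt) nxt) nxt ↔
        t ∈ nxt ∨ ∃ s ∈ fr, ∃ e ∈ elems, (0 < e ∧ e ≤ s) ∧ t = s - e ∧ 0 < t ∧ t ∉ seen := by
    intro fr
    induction fr with
    | nil => simp
    | cons s rest ih =>
      intro nxt
      simp only [List.foldl_cons]
      rw [ih, mem_innerFold]
      constructor
      · rintro (⟨hn | ⟨e, he, hg, ht, hp, hns⟩⟩ | ⟨s', hs', rest'⟩)
        · exact Or.inl hn
        · exact Or.inr ⟨s, by simp, e, he, hg, ht, hp, hns⟩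
        · exact Or.inr ⟨s', by simp [hs'], rest'⟩
      · rintro (hn | ⟨s', hs', e, he, hg, ht, hp, hns⟩)
        · exact Or.inl (Or.inl hn)
        · rcases List.mem_cons.mp hs' with rfl | hs'
          · exact Or.inl (Or.inr ⟨e, he, hg, ht, hp, hns⟩)
          · exact Or.inr ⟨s', hs', e, he, hg, ht, hp, hns⟩
  rw [gen]
  simp

theorem reach_ok (elems : List Int) : ∀ (fuel bound : Nat) (seen frontier : PySem.Set Int),
    (∀ t ∈ frontier, 0 < t ∧ t ≤ (bound : Int)) →
    bound < fuel →
    (∀ s ∈ seen, 0 < s) →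
    (∀ s ∈ seen, ∀ e ∈ elems, 0 < e → e ≤ s → s - e = 0 ∨ s - e ∈ seen ∨ s - e ∈ frontier) →
    seen.Nodup →
    (∀ t, (t ∈ seen ∨ t ∈ frontier) → t ∈ reachLoop elems fuel seen frontier) ∧
    (∀ s ∈ reachLoop elems fuel seen frontier, 0 < s) ∧
    (∀ s ∈ reachLoop elems fuel seen frontier, ∀ e ∈ elems, 0 < e → e ≤ s →
      s - e = 0 ∨ s - e ∈ reachLoop elems fuel seen frontier) ∧
    (reachLoop elems fuel seen frontier).Nodup := by
  intro fuel
  induction fuel with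
  | zero => intro bound seen frontier _ h2; omega
  | succ fuel ih =>
    intro bound seen frontier h1 h2 h3 h4 h5
    by_cases hemp : frontier = ([] : List Int)
    · subst hemp
      simp only [reachLoop, reduceIte]
      refine ⟨?_, h3, ?_, h5⟩
      · rintro t (ht | ht)
        · exact ht
        · simp at ht
      · intro s hs e he hp hle
        rcases h4 s hs e he hp hle with h | h | h
        · exact Or.inl h
        · exact Or.inr h
        · simp at h
    · simp only [reachLoop, if_neg hemp]
      obtain ⟨t0, ht0⟩ : ∃ t, t ∈ frontier := by
        cases frontier with
        | nil => exact absurd rfl hemp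
        | cons a b => exact ⟨a, by simp⟩
      have hbpos : 1 ≤ bound := by
        have := h1 t0 ht0
        omega
      have hmemup : ∀ x : Int, x ∈ PySem.Set.update seen frontier ↔ x ∈ seen ∨ x ∈ frontier :=
        fun x => PySem.Set.mem_update seen frontier x
      have hfr' : ∀ t ∈ levelStep elems (PySem.Set.update seen frontier) frontier,
          0 < t ∧ t ≤ ((bound - 1 : Nat) : Int) := by
        intro t ht
        rw [mem_levelStep] at ht
        obtain ⟨s, hs, e, he, hg, hts, hp, hns⟩ := ht
        have := h1 s hs
        constructor
        · exact hp
        · omega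
      have h3' : ∀ s ∈ PySem.Set.update seen frontier, 0 < s := by
        intro s hs
        rcases (hmemup s).mp hs with h | h
        · exact h3 s h
        · exact (h1 s h).1
      have h4' : ∀ s ∈ PySem.Set.update seen frontier, ∀ e ∈ elems, 0 < e → e ≤ s →
          s - e = 0 ∨ s - e ∈ PySem.Set.update seen frontier ∨
            s - e ∈ levelStep elems (PySem.Set.update seen frontier) frontier := by
        intro s hs e he hp hle
        rcases (hmemup s).mp hs with hseen | hfro
        · rcases h4 s hseen e he hp hle with h | h | h
          · exact Or.inl h
          · exact Or.inr (Or.inl ((hmemup _).mpr (Or.inl h)))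
          · exact Or.inr (Or.inl ((hmemup _).mpr (Or.inr h)))
        · by_cases hz : s - e = 0
          · exact Or.inl hz
          · have hppos : 0 < s - e := by omega
            by_cases hin : s - e ∈ PySem.Set.update seen frontier
            · exact Or.inr (Or.inl hin)
            · refine Or.inr (Or.inr ?_)
              rw [mem_levelStep]
              exact ⟨s, hfro, e, he, ⟨hp, hle⟩, rfl, hppos, hin⟩
      have h5' : (PySem.Set.update seen frontier).Nodup := PySem.Set.nodup_update seen frontier h5
      obtain ⟨c1, c2, c3, c4⟩ := ih (bound - 1) (PySem.Set.update seen frontier)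
        (levelStep elems (PySem.Set.update seen frontier) frontier) hfr' (by omega) h3' h4' h5'
      refine ⟨?_, c2, c3, c4⟩
      rintro t (ht | ht)
      · exact c1 t (Or.inl ((hmemup t).mpr (Or.inl ht)))
      · exact c1 t (Or.inl ((hmemup t).mpr (Or.inr ht)))

-- ===== B-side: the DP pass =====

theorem dp_fold_ok (elems : List Int) (S : List Int)
    (hpos : ∀ s ∈ S, 0 < s)
    (hclos : ∀ s ∈ S, ∀ e ∈ elems, 0 < e → e ≤ s → s - e = 0 ∨ s - e ∈ S) :
    ∀ (suffix P : List Int) (dp : PySem.Dict Int Int),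
    (∀ x : Int, x ∈ P ++ suffix ↔ x ∈ S) →
    (P ++ suffix).Pairwise (· < ·) →
    (∀ k : Int, PySem.Dict.contains dp k = true ↔ (k = 0 ∨ k ∈ P)) →
    (∀ k : Int, (k = 0 ∨ k ∈ P) → PySem.Dict.getD dp k 0 = F elems k) →
    (∀ k : Int, (k = 0 ∨ k ∈ P ++ suffix) →
      PySem.Dict.getD
        (suffix.foldl
          (fun dp s =>
            PySem.Dict.insert dp s
              (elems.foldl
                (fun acc e => if 0 < e ∧ e ≤ s then acc + PySem.Dict.getD dp (s - e) 0 else acc) 0))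
          dp) k 0 = F elems k) := by
  intro suffix
  induction suffix with
  | nil =>
    intro P dp _ _ _ hdp2 k hk
    simpa using hdp2 k (by simpa using hk)
  | cons s rest ih =>
    intro P dp hmem hpw hdp1 hdp2
    have hsS : s ∈ S := (hmem s).mp (by simp)
    have hspos : 0 < s := hpos s hsS
    -- the freshly computed value is F elems s
    have hlook : ∀ e ∈ elems, 0 < e → e ≤ s → PySem.Dict.getD dp (s - e) 0 = F elems (s - e) := by
      intro e he hp hle
      rcases hclos s hsS e he hp hle with hz | hmemS
      · rw [hz]
        exact hdp2 0 (Or.inl rfl)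
      · have hlt : s - e < s := by omega
        have hx : s - e ∈ P ++ s :: rest := (hmem (s - e)).mpr hmemS
        rcases List.mem_append.mp hx with hP | hsr
        · exact hdp2 (s - e) (Or.inr hP)
        · exfalso
          rcases List.mem_cons.mp hsr with heq | hrest
          · omega
          · have hcons : (s :: rest).Pairwise (· < ·) := (List.pairwise_append.mp hpw).2.1
            have := (List.pairwise_cons.mp hcons).1 (s - e) hrest
            omega
    have haccF :
        elems.foldl (fun acc e => if 0 < e ∧ e ≤ s then acc + PySem.Dict.getD dp (s - e) 0 else acc) 0
          = F elems s := by
      rw [F_unfold_pos elems s hspos]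
      apply foldl_congr_mem'
      intro e he acc
      by_cases hg : 0 < e ∧ e ≤ s
      · rw [if_pos hg, if_pos hg, hlook e he hg.1 hg.2]
      · rw [if_neg hg, if_neg hg]
    -- continue with P' = P ++ [s]
    simp only [List.foldl_cons]
    have hassoc : (P ++ [s]) ++ rest = P ++ s :: rest := by simp
    intro k hk
    refine ih (P ++ [s]) _ ?_ ?_ ?_ ?_ k ?_
    · rw [hassoc]; exact hmem
    · rw [hassoc]; exact hpw
    · intro k'
      rw [PySem.Dict.contains_insert]
      constructor
      · intro h
        rcases Bool.or_eq_true_iff.mp h with h | h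
        · have : k' = s := by simpa using h
          subst this
          exact Or.inr (by simp)
        · rcases (hdp1 k').mp h with h | h
          · exact Or.inl h
          · exact Or.inr (by simp [h])
      · intro h
        rcases h with h | h
        · exact Bool.or_eq_true_iff.mpr (Or.inr ((hdp1 k').mpr (Or.inl h)))
        · rcases List.mem_append.mp h with h | h
          · exact Bool.or_eq_true_iff.mpr (Or.inr ((hdp1 k').mpr (Or.inr h)))
          · have : k' = s := by simpa using h
            exact Bool.or_eq_true_iff.mpr (Or.inl (by simp [this]))
    · intro k' hk'
      rw [PySem.Dict.getD_insert]
      by_cases hks : k' = s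
      · rw [if_pos hks, hks, haccF]
      · rw [if_neg hks]
        apply hdp2
        rcases hk' with h | h
        · exact Or.inl h
        · rcases List.mem_append.mp h with h | h
          · exact Or.inr h
          · exact absurd (by simpa using h) hks
    · rw [hassoc]; exact hk

-- B computes F on every input (no precondition needed on B's side).
theorem alt_eq_F (elems : List Int) (sum : Int) : countCompositions_alt elems sum = F elems sum := by
  by_cases hs : 0 < sum
  · have hfr0 : (if 0 < sum then PySem.Set.add PySem.Set.empty sum else PySem.Set.empty) = [sum] := by
      rw [if_pos hs]
      rw [PySem.Set.add_of_not_mem (by simp [PySem.Set.empty])]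
      rfl
    show PySem.Dict.getD
        ((PySem.List.sorted
            (reachLoop elems (sum.toNat + 1) PySem.Set.empty
              (if 0 < sum then PySem.Set.add PySem.Set.empty sum else PySem.Set.empty))
            (fun x => x) false).foldl
          (fun dp s =>
            PySem.Dict.insert dp s
              (elems.foldl
                (fun acc e => if 0 < e ∧ e ≤ s then acc + PySem.Dict.getD dp (s - e) 0 else acc) 0))
          (PySem.Dict.insert PySem.Dict.empty 0 1)) sum 0 = F elems sum
    rw [hfr0]
    obtain ⟨c1, c2, c3, c4⟩ := reach_ok elems (sum.toNat + 1) sum.toNat PySem.Set.empty [sum]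
      (by intro u hu; simp at hu; subst hu; exact ⟨hs, by omega⟩)
      (by omega)
      (by intro x hx; simp [PySem.Set.empty] at hx)
      (by intro x hx; simp [PySem.Set.empty] at hx)
      (by simp [PySem.Set.empty])
    set S := reachLoop elems (sum.toNat + 1) PySem.Set.empty [sum] with hS
    have hmemL : ∀ x : Int, x ∈ PySem.List.sorted S (fun x => x) false ↔ x ∈ S := by
      intro x; exact PySem.List.mem_sorted S (fun x => x) false x
    have hndL : (PySem.List.sorted S (fun x : Int => x) false).Nodup :=
      (PySem.List.sorted_perm S (fun x : Int => x) false).nodup_iff.mpr c4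
    have hleL : (PySem.List.sorted S (fun x : Int => x) false).Pairwise (· ≤ ·) := by
      have := PySem.List.sorted_pairwise S (fun x : Int => x)
      simpa using this
    have hpwL : (PySem.List.sorted S (fun x : Int => x) false).Pairwise (· < ·) := by
      have h2 : (PySem.List.sorted S (fun x : Int => x) false).Pairwise (· ≠ ·) := hndL
      exact (hleL.and h2).imp (fun h => lt_of_le_of_ne h.1 h.2)
    have := dp_fold_ok elems S c2 c3 (PySem.List.sorted S (fun x => x) false) []
      (PySem.Dict.insert PySem.Dict.empty 0 1)
      (by intro x; simp only [List.nil_append]; exact hmemL x)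
      (by simpa using hpwL)
      (by
        intro k
        rw [PySem.Dict.contains_insert]
        simp [PySem.Dict.contains_empty])
      (by
        intro k hk
        rcases hk with hk | hk
        · subst hk
          rw [PySem.Dict.getD_insert_self, F_zero]
        · simp at hk)
    apply this sum
    refine Or.inr ?_
    simp only [List.nil_append]
    exact (hmemL sum).mpr (c1 sum (Or.inr (by simp)))
  · have hfr0 : (if 0 < sum then PySem.Set.add PySem.Set.empty sum else PySem.Set.empty) = ([] : List Int) := by
      rw [if_neg hs]; rfl
    show PySem.Dict.getD
        ((PySem.List.sorted
            (reachLoop elems (sum.toNat + 1) PySem.Set.empty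
              (if 0 < sum then PySem.Set.add PySem.Set.empty sum else PySem.Set.empty))
            (fun x => x) false).foldl
          (fun dp s =>
            PySem.Dict.insert dp s
              (elems.foldl
                (fun acc e => if 0 < e ∧ e ≤ s then acc + PySem.Dict.getD dp (s - e) 0 else acc) 0))
          (PySem.Dict.insert PySem.Dict.empty 0 1)) sum 0 = F elems sum
    rw [hfr0]
    have hrl : reachLoop elems (sum.toNat + 1) PySem.Set.empty ([] : List Int) = ([] : List Int) := by
      simp [reachLoop, PySem.Set.empty]
    rw [hrl]
    have hsorted : PySem.List.sorted ([] : List Int) (fun x : Int => x) false = [] := by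
      exact (PySem.List.sorted_eq_nil_iff ([] : List Int) (fun x : Int => x) false).mpr rfl
    rw [hsorted]
    simp only [List.foldl_nil]
    by_cases h0 : sum = 0
    · subst h0
      rw [PySem.Dict.getD_insert_self, F_zero]
    · rw [PySem.Dict.getD_insert, if_neg h0, PySem.Dict.getD_empty, F_neg elems sum (by omega)]

-- ===== VERDICT (by name: the statement is the Claim_ definition above) =====
theorem countCompositions_spec : Claim_equal_countCompositions := by
  intro elems sum _ hpre
  unfold Spec_countCompositions countCompositions
  rw [alt_eq_F]
  exact (memo_main elems (sum.toNat + 1) sum ∅ hpre (by omega)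
    (fun k v h => by simp at h)).1
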